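-- pv_equiv track=rewrite | github.com/Dhananjaymahajan2001/Line-Encoder | final.py | dec_DManchester
-- ===== SOURCE A (Python) =====
-- def dec_DManchester(data_dmanc):
--     data = []
--     if data_dmanc[1] == 1:
--         data.append(1)
--     else:
--         data.append(0)
--     for i in range(3, len(data_dmanc), 2):
--         if data_dmanc[i] == data_dmanc[i - 2]:
--             data.append(0)
--         else:
--             data.append(1)
--     return data
-- ===== SOURCE B (Python) =====
-- def dec_DManchester(data_dmanc):
--     samples = data_dmanc[1::2]
--     data = [1 if samples[0] == 1 else 0]
--     for a, b in zip(samples[1:], samples):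
--         data.append(0 if a == b else 1)
--     return data
-- ===== Notes on version B (the rewrite author's own statement) =====
-- stated objective: simpler
-- what changed: B replaces A's index-stride loop (range(3, len, 2) with xs[i] vs xs[i-2] lookups) by extracting the odd-indexed samples once with a stride slice and emitting the difference bits with a single pairwise zip scan over that subsequence.
import Mathlib
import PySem

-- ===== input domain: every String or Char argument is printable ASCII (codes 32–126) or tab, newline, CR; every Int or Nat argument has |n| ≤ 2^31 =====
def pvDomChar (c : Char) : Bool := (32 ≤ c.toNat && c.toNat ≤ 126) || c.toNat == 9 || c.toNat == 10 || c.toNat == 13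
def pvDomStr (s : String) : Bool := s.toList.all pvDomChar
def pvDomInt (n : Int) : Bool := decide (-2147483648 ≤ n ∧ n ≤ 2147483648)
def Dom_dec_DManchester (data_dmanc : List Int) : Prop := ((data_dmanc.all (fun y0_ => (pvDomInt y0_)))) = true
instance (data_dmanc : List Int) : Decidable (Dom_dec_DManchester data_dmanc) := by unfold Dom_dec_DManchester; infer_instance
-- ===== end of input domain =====

-- B replaces A's index-stride loop by extracting the odd-indexed samples with one stride
-- slice and comparing adjacent samples with a pairwise zip scan (objective: simpler).

-- ===== PORT A =====
-- Literal port of A. Indices i and i-2 produced by range(3, len, 2) are always in range,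
-- so reading them through pyGetD (default 0) is exact; data_dmanc[1] raises IndexError
-- when the list is shorter than 2 — those inputs are excluded by Pre_.
def dec_DManchester (data_dmanc : List Int) : List Int :=
  let data : List Int :=
    if PySem.List.pyGetD data_dmanc 1 0 == 1 then [1] else [0]
  (PySem.List.pyRange 3 (data_dmanc.length : Int) 2).foldl
    (fun data i =>
      if PySem.List.pyGetD data_dmanc i 0 == PySem.List.pyGetD data_dmanc (i - 2) 0 then
        data ++ [0]
      else
        data ++ [1])
    data

-- ===== PORT B =====
-- Literal port of Source B: samples = data_dmanc[1::2]; first bit from samples[0]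
-- (IndexError on empty samples is excluded by Pre_); then a fold over
-- zip(samples[1:], samples) appending the pairwise difference bits.
def dec_DManchester_alt (data_dmanc : List Int) : List Int :=
  let samples : List Int := (PySem.List.slice? data_dmanc (some 1) none 2).getD []
  let data : List Int :=
    if PySem.List.pyGetD samples 0 0 == 1 then [1] else [0]
  ((PySem.List.slice samples (some 1) none).zip samples).foldl
    (fun data p => if p.1 == p.2 then data ++ [0] else data ++ [1])
    data

-- ===== PRECONDITION & SPEC =====
-- A evaluates data_dmanc[1], which raises IndexError on lists of length < 2; exactly
-- those inputs are excluded.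
def Pre_dec_DManchester (data_dmanc : List Int) : Prop := 2 ≤ data_dmanc.length
instance (data_dmanc : List Int) : Decidable (Pre_dec_DManchester data_dmanc) := by
  unfold Pre_dec_DManchester; infer_instance
def pvWitness_dec_DManchester : List Int := [1, 1, 0, 1, 1, 0]
def Spec_dec_DManchester (data_dmanc : List Int) (out : List Int) : Prop := out = dec_DManchester_alt data_dmanc
instance (data_dmanc : List Int) (out : List Int) : Decidable (Spec_dec_DManchester data_dmanc out) := by unfold Spec_dec_DManchester; infer_instance

-- ===== CLAIM (what is proved, stated in full; the proofs are below) =====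
def Claim_equal_dec_DManchester : Prop := ∀ (data_dmanc : List Int), Dom_dec_DManchester data_dmanc → Pre_dec_DManchester data_dmanc → Spec_dec_DManchester data_dmanc (dec_DManchester data_dmanc)

-- ===== LEMMAS AND PROOFS =====

-- the odd-indexed elements of a list (xs[1::2])
def pvOdds : List Int → List Int
  | _ :: b :: r => b :: pvOdds r
  | _ => []

-- pairwise difference bits over a sample list, given the previous sample
def pvPd : Int → List Int → List Int
  | p, b :: r => (if b == p then 0 else 1) :: pvPd b r
  | _, [] => []

-- difference bits over the raw stream (two raw symbols per output bit)
def pvD : Int → List Int → List Int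
  | p, _ :: b :: r => (if b == p then 0 else 1) :: pvD b r
  | _, _ => []

lemma pvFoldl_snoc (c : α → Bool) (l : List α) (init : List Int) :
    l.foldl (fun acc x => if c x then acc ++ [0] else acc ++ [1]) init
      = init ++ l.map (fun x => if c x then (0 : Int) else 1) := by
  induction l generalizing init with
  | nil => simp
  | cons a l ih => by_cases h : c a <;> simp [h, ih]

lemma pvRange2_nil {a b : Int} (h : b ≤ a) : PySem.List.pyRange a b 2 = [] := by
  simp [PySem.List.pyRange]
  omega

lemma pvRange2_cons {a b : Int} (h : a < b) :
    PySem.List.pyRange a b 2 = a :: PySem.List.pyRange (a + 2) b 2 := by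
  simp only [PySem.List.pyRange, if_neg (by norm_num : (2:Int) ≠ 0),
    if_pos (by norm_num : (0:Int) < 2), if_pos h]
  by_cases h2 : a + 2 < b
  · rw [if_pos h2]
    have hc : ((b - a + 2 - 1) / 2).toNat = ((b - (a + 2) + 2 - 1) / 2).toNat + 1 := by
      have := Int.add_mul_ediv_right (b - (a + 2) + 1) 1 (by norm_num : (2:Int) ≠ 0)
      omega
    rw [hc, List.range_succ_eq_map, List.map_cons, List.map_map]
    refine List.cons_eq_cons.mpr ⟨by norm_num, ?_⟩
    refine List.map_congr_left (fun k _ => ?_)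
    simp [Function.comp]
    push_cast
    ring
  · rw [if_neg h2]
    have hc : ((b - a + 2 - 1) / 2).toNat = 1 := by omega
    rw [hc]
    norm_num [List.range_succ]

lemma pvL1 (xs : List Int) : ∀ (m j : Nat), xs.length ≤ m + j →
    (PySem.List.pyRange ((j : Int) + 2) (xs.length : Int) 2).map
        (fun i => if PySem.List.pyGetD xs i 0 == PySem.List.pyGetD xs (i - 2) 0 then (0 : Int) else 1)
      = pvD (PySem.List.pyGetD xs (j : Int) 0) (xs.drop (j + 1)) := by
  intro m
  induction m with
  | zero =>
    intro j hj
    rw [pvRange2_nil (by exact_mod_cast by omega)]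
    have : xs.drop (j + 1) = [] := List.drop_eq_nil_of_le (by omega)
    simp [this, pvD]
  | succ m ih =>
    intro j hj
    by_cases h : j + 3 ≤ xs.length
    · have hcons : PySem.List.pyRange ((j : Int) + 2) (xs.length : Int) 2
          = ((j : Int) + 2) :: PySem.List.pyRange ((j : Int) + 2 + 2) (xs.length : Int) 2 := by
        exact pvRange2_cons (by exact_mod_cast by omega)
      have hrec := ih (j + 2) (by omega)
      have hget : ∀ (k : Nat), PySem.List.pyGetD xs (k : Int) 0 = (xs[k]?).getD 0 := by
        intro k; simp [PySem.List.pyGetD_natCast]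
      -- expose two elements of xs.drop (j+1)
      obtain ⟨a, b, r, hdrop⟩ : ∃ a b r, xs.drop (j + 1) = a :: b :: r := by
        have h1 : j + 1 < xs.length := by omega
        have h2 : j + 2 < xs.length := by omega
        refine ⟨xs[j+1], xs[j+2], xs.drop (j + 3), ?_⟩
        rw [List.drop_eq_getElem_cons h1, List.drop_eq_getElem_cons h2]
      have hb : xs[j+2]? = some b := by
        have := congrArg (fun l => l[1]?) hdrop
        simpa [List.getElem?_drop] using this
      have hdrop3 : xs.drop (j + 3) = r := by
        have := congrArg (fun l => l.drop 2) hdrop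
        simpa [List.drop_drop] using this
      rw [hcons]
      simp only [List.map_cons]
      have e1 : ((j : Int) + 2) - 2 = (j : Int) := by ring
      have e2 : ((j : Int) + 2) = ((j + 2 : Nat) : Int) := by push_cast; ring
      have e3 : ((j : Int) + 2 + 2) = ((j + 2 : Nat) : Int) + 2 := by push_cast; ring
      rw [e1, e2, hrec, hdrop]
      have h4 : j + 2 + 1 = j + 3 := by omega
      rw [show pvD (PySem.List.pyGetD xs ((j:Int)) 0) (a :: b :: r)
            = (if b == PySem.List.pyGetD xs ((j:Int)) 0 then (0:Int) else 1) :: pvD b r from rfl]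
      rw [hget (j + 2), hb, h4, hdrop3]
      simp
    · rw [pvRange2_nil (by exact_mod_cast by omega)]
      have hlen : (xs.drop (j + 1)).length ≤ 1 := by simp; omega
      rcases hd : xs.drop (j + 1) with _ | ⟨a, t⟩
      · simp [pvD]
      · have hl := congrArg List.length hd
        simp at hl
        have : t = [] := List.eq_nil_of_length_eq_zero (by omega)
        subst this
        simp [pvD]

lemma pvSlice_formula (xs : List Int) :
    (PySem.List.slice? xs (some 1) none 2).getD []
      = (List.range (xs.length / 2)).filterMap (fun k => xs[2 * k + 1]?) := by
  rcases xs with _ | ⟨a, t⟩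
  · simp [PySem.List.slice?, PySem.List.sliceIndices]
  · simp only [PySem.List.slice?, PySem.List.sliceIndices]
    norm_num
    rw [show (if 0 < t.length then (((t.length : Int) + 2 - 1) / 2).toNat else 0)
          = (t.length + 1) / 2 from by split <;> omega]
    refine List.filterMap_congr (fun k _ => ?_)
    rw [show ((1 : Int) + 2 * (k : Nat)).toNat = 2 * k + 1 from by omega]
    simp

lemma pvOdds_formula : ∀ xs : List Int,
    (List.range (xs.length / 2)).filterMap (fun k => xs[2 * k + 1]?) = pvOdds xs
  | [] => by simp [pvOdds]
  | [a] => by simp [pvOdds]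
  | a :: b :: r => by
    have ih := pvOdds_formula r
    have hl : (a :: b :: r).length / 2 = r.length / 2 + 1 := by simp; omega
    rw [hl, List.range_succ_eq_map, List.filterMap_cons, List.filterMap_map]
    have hfm : List.filterMap ((fun k => (a :: b :: r)[2 * k + 1]?) ∘ (fun k => k + 1))
          (List.range (r.length / 2))
        = List.filterMap (fun k => r[2 * k + 1]?) (List.range (r.length / 2)) := by
      refine List.filterMap_congr (fun k _ => ?_)
      simp [Function.comp]
      rw [show 2 * (k + 1) = 2 * k + 1 + 1 from by omega]
      simp
    rw [hfm, ih]
    simp [pvOdds]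

lemma pvSamples_eq (xs : List Int) :
    (PySem.List.slice? xs (some 1) none 2).getD [] = pvOdds xs := by
  rw [pvSlice_formula, pvOdds_formula]

lemma pvZip_pd (init : List Int) : ∀ (t : List Int) (p : Int),
    (t.zip (p :: t)).foldl (fun data q => if q.1 == q.2 then data ++ [0] else data ++ [1]) init
      = init ++ pvPd p t := by
  intro t
  induction t generalizing init with
  | nil => intro p; simp [pvPd]
  | cons b t ih =>
    intro p
    rw [List.zip_cons_cons, List.foldl_cons, ih]
    by_cases h : b == p <;> simp [pvPd, h]

lemma pvPd_odds : ∀ (r : List Int) (p : Int), pvPd p (pvOdds r) = pvD p r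
  | [], _ => rfl
  | [_], _ => rfl
  | _ :: b :: r, p => by simp [pvOdds, pvPd, pvD, pvPd_odds r b]

-- ===== VERDICT (by name: the statement is the Claim_ definition above) =====
theorem dec_DManchester_spec : Claim_equal_dec_DManchester := by
  intro xs _ hpre
  unfold Pre_dec_DManchester at hpre
  obtain ⟨x0, x1, r, rfl⟩ : ∃ x0 x1 r, xs = x0 :: x1 :: r := by
    rcases xs with _ | ⟨x0, _ | ⟨x1, r⟩⟩
    · exact absurd hpre (by simp)
    · exact absurd hpre (by simp)
    · exact ⟨x0, x1, r, rfl⟩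
  show dec_DManchester _ = dec_DManchester_alt _
  unfold dec_DManchester dec_DManchester_alt
  simp only [pvSamples_eq]
  rw [show pvOdds (x0 :: x1 :: r) = x1 :: pvOdds r from rfl]
  have hg1 : PySem.List.pyGetD (x0 :: x1 :: r) 1 0 = x1 := by
    rw [show (1 : Int) = ((1 : Nat) : Int) from rfl, PySem.List.pyGetD_natCast]; rfl
  have hg0 : PySem.List.pyGetD (x1 :: pvOdds r) 0 0 = x1 := by
    rw [show (0 : Int) = ((0 : Nat) : Int) from rfl, PySem.List.pyGetD_natCast]; rfl
  rw [hg1, hg0, PySem.List.slice_from_one]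
  rw [show (x1 :: pvOdds r).tail = pvOdds r from rfl]
  rw [pvZip_pd, pvPd_odds]
  rw [pvFoldl_snoc
    (fun i => PySem.List.pyGetD (x0 :: x1 :: r) i 0 == PySem.List.pyGetD (x0 :: x1 :: r) (i - 2) 0)]
  have h1 := pvL1 (x0 :: x1 :: r) (x0 :: x1 :: r).length 1 (by omega)
  rw [show ((1 : Nat) : Int) + 2 = 3 from by norm_num] at h1
  rw [show ((1 : Nat) : Int) = (1 : Int) from rfl, hg1] at h1
  rw [h1]
  rfl
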